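-- pv_equiv track=rewrite | github.com/koebi/alda_ss19 | loesungen/zettel02/sort.py | checkSorting
-- ===== SOURCE A (Python) =====
-- import copy
--
-- def checkSorting(arrayBefore, arrayAfter):
--     # Axiom 1: Gleiche Länge
--     if len(arrayBefore) != len(arrayAfter):
--         return False
--
--     # Kopie des Originals
--     kopie = copy.deepcopy(arrayBefore)
--     # Enthalten die Arrays die gleichen elemente, sollte es möglich sein, aus
--     # der Kopie alle Elemente des "sortierten" Arrays zu löschen und das danach
--     # leer zu haben
--     for x in arrayAfter:
--         try:
--             kopie.remove(x)
--         except: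
--             return False
--
--     if len(kopie) != 0:
--         return False
--
--     # Sortierung prüfen
--     # Ist die Liste zu kurz (also hat 0 oder Element) wird range(0) oder
--     # range(-1) ausgeführt, was keinen Effekt hat :)
--     for i in range(len(arrayAfter) - 1):
--         if arrayAfter[i] > arrayAfter[i + 1]:
--             return False
--
--     # Falls alles gut, True zurückgeben
--     return True
-- ===== SOURCE B (Python) =====
-- def checkSorting(arrayBefore, arrayAfter):
--     # simpler: a sorted permutation of arrayBefore is exactly sorted(arrayBefore)
--     if len(arrayBefore) != len(arrayAfter):
--         return False
--     return sorted(arrayBefore) == arrayAfter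
-- ===== Notes on version B (the rewrite author's own statement) =====
-- stated objective: simpler
-- what changed: Replaces the O(n^2) copy/remove multiset check plus the adjacent-pair sortedness scan with a single 'sorted(arrayBefore) == arrayAfter' comparison (after the same length guard).
import Mathlib
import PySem

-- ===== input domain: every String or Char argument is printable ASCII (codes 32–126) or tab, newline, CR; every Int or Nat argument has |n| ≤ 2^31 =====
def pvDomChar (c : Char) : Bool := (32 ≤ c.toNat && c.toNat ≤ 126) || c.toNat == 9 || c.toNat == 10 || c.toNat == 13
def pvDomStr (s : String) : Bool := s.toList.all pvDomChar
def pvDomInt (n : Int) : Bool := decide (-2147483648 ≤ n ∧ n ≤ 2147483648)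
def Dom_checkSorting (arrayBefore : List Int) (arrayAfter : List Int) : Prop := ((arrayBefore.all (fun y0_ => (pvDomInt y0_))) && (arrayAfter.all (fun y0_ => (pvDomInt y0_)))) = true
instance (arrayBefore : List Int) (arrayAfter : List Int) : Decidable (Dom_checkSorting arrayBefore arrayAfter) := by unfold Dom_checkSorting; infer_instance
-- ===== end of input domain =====

-- B replaces A's quadratic copy/remove multiset check plus adjacent-pair scan by a single
-- sorted(arrayBefore) == arrayAfter comparison (same length guard); equal return values on all inputs.

-- ===== PORT A =====
-- 'for x in arrayAfter: try: kopie.remove(x) except: return False' — none models the early 'return False'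
def pvRemoveLoop (kopie : List Int) (rest : List Int) : Option (List Int) :=
  match rest with
  | [] => some kopie
  | x :: xs =>
    match PySem.List.remove? kopie x with
    | none => none
    | some k => pvRemoveLoop k xs

def checkSorting (arrayBefore : List Int) (arrayAfter : List Int) : Bool :=
  if arrayBefore.length ≠ arrayAfter.length then false
  else
    match pvRemoveLoop arrayBefore arrayAfter with
    | none => false
    | some kopie =>
      if kopie.length ≠ 0 then false
      else
        -- 'for i in range(len(arrayAfter)-1): if arrayAfter[i] > arrayAfter[i+1]: return False';
        -- both indices are always in range, so pyGetD's default is unreachable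
        (PySem.List.pyRange 0 ((arrayAfter.length : Int) - 1) 1).foldl
          (fun ok i =>
            if PySem.List.pyGetD arrayAfter i 0 > PySem.List.pyGetD arrayAfter (i + 1) 0 then false
            else ok) true

-- ===== PORT B =====
def checkSorting_alt (arrayBefore : List Int) (arrayAfter : List Int) : Bool :=
  if arrayBefore.length ≠ arrayAfter.length then false
  else decide (PySem.List.sorted arrayBefore (fun x => x) = arrayAfter)

-- ===== PRECONDITION & SPEC =====
def Spec_checkSorting (arrayBefore : List Int) (arrayAfter : List Int) (out : Bool) : Prop := out = checkSorting_alt arrayBefore arrayAfter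
instance (arrayBefore : List Int) (arrayAfter : List Int) (out : Bool) : Decidable (Spec_checkSorting arrayBefore arrayAfter out) := by unfold Spec_checkSorting; infer_instance

-- ===== CLAIM (what is proved, stated in full; the proofs are below) =====
def Claim_equal_checkSorting : Prop := ∀ (arrayBefore : List Int) (arrayAfter : List Int), Dom_checkSorting arrayBefore arrayAfter → Spec_checkSorting arrayBefore arrayAfter (checkSorting arrayBefore arrayAfter)

-- ===== LEMMAS AND PROOFS =====

-- the remove loop succeeds leaving k exactly when kopie is (as a multiset) rest plus k
theorem pvRemoveLoop_perm (rest : List Int) : ∀ (kopie k : List Int),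
    pvRemoveLoop kopie rest = some k → kopie.Perm (rest ++ k) := by
  induction rest with
  | nil => intro kopie k h; simp [pvRemoveLoop] at h; simp [h]
  | cons x xs ih =>
    intro kopie k h
    simp only [pvRemoveLoop] at h
    rcases hr : PySem.List.remove? kopie x with _ | k'
    · rw [hr] at h; simp at h
    · rw [hr] at h
      have hx : x ∈ kopie := by
        by_contra hx
        rw [(PySem.List.remove?_eq_none_iff kopie x).mpr hx] at hr; simp at hr
      rw [PySem.List.remove?_eq_some_erase kopie x hx] at hr
      have h1 : kopie.Perm (x :: kopie.erase x) := List.perm_cons_erase hx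
      have h2 := ih _ _ h
      rw [← Option.some_inj.mp hr] at h2
      exact h1.trans (h2.cons x)

theorem pvRemoveLoop_of_perm (rest : List Int) : ∀ (kopie : List Int),
    rest.Perm kopie → pvRemoveLoop kopie rest = some [] := by
  induction rest with
  | nil => intro kopie h; rw [h.symm.eq_nil]; rfl
  | cons x xs ih =>
    intro kopie h
    have hx : x ∈ kopie := h.mem_iff.mp (List.mem_cons_self)
    simp only [pvRemoveLoop, PySem.List.remove?_eq_some_erase kopie x hx]
    exact ih _ ((List.perm_cons_erase hx).symm.trans h.symm).symm.cons_inv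

-- from adjacent comparisons to Pairwise (≤)
theorem pairwise_of_adj (b : List Int)
    (h : ∀ (i : Nat), (h1 : i + 1 < b.length) → b[i] ≤ b[i + 1]) :
    b.Pairwise (· ≤ ·) := by
  have mono : ∀ (j : Nat) (hj : j < b.length) (i : Nat) (hij : i ≤ j), b[i] ≤ b[j] := by
    intro j
    induction j with
    | zero => intro hj i hij; interval_cases i; exact le_refl _
    | succ j ihj =>
      intro hj i hij
      rcases Nat.lt_or_ge i (j + 1) with hlt | hge
      · exact le_trans (ihj (by omega) i (by omega)) (h j hj)
      · have : i = j + 1 := by omega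
        subst this; exact le_refl _
  rw [List.pairwise_iff_getElem]
  intro i j hi hj hij
  exact mono j hj i (by omega)

-- the adjacent-pair scan of port A, characterised
theorem scan_eq_true_iff (b : List Int) :
    ((PySem.List.pyRange 0 ((b.length : Int) - 1) 1).foldl
      (fun ok i =>
        if PySem.List.pyGetD b i 0 > PySem.List.pyGetD b (i + 1) 0 then false
        else ok) true = true)
    ↔ b.Pairwise (· ≤ ·) := by
  have hfold := PySem.List.foldl_if_false_eq
      (p := fun i => decide (PySem.List.pyGetD b i 0 > PySem.List.pyGetD b (i + 1) 0))
      (l := PySem.List.pyRange 0 ((b.length : Int) - 1) 1) (b := true)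
  simp only [decide_eq_true_eq] at hfold
  rw [hfold]
  simp only [Bool.true_and, Bool.not_eq_eq_eq_not, Bool.not_true, List.any_eq_false,
    decide_eq_true_eq, not_lt]
  constructor
  · intro h
    apply pairwise_of_adj
    intro i h1
    have hm : (i : Int) ∈ PySem.List.pyRange 0 ((b.length : Int) - 1) 1 :=
      PySem.List.mem_pyRange_one.mpr (by constructor <;> omega)
    have := h _ hm
    rw [PySem.List.pyGetD_eq_getElem b 0 (by omega) (by omega),
        PySem.List.pyGetD_eq_getElem b 0 (by omega) (by omega)] at this
    have e1 : ((i : Int)).toNat = i := by omega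
    have e2 : ((i : Int) + 1).toNat = i + 1 := by omega
    simpa [e1, e2] using this
  · intro hp i hm
    obtain ⟨h0, h1⟩ := PySem.List.mem_pyRange_one.mp hm
    rw [PySem.List.pyGetD_eq_getElem b 0 h0 (by omega),
        PySem.List.pyGetD_eq_getElem b 0 (by omega) (by omega)]
    exact List.pairwise_iff_getElem.mp hp i.toNat (i + 1).toNat (by omega) (by omega) (by omega)

-- ===== VERDICT (by name: the statement is the Claim_ definition above) =====
theorem checkSorting_spec : Claim_equal_checkSorting := by
  intro a b _
  unfold Spec_checkSorting checkSorting checkSorting_alt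
  by_cases hl : a.length = b.length
  · simp only [hl, ne_eq, not_true_eq_false, if_false]
    by_cases hs : PySem.List.sorted a (fun x => x) = b
    · -- B returns true; show A does too
      have hperm : b.Perm a := hs ▸ PySem.List.sorted_perm a (fun x => x) false
      have hpair : b.Pairwise (· ≤ ·) := hs ▸ PySem.List.sorted_pairwise a (fun x => x)
      rw [pvRemoveLoop_of_perm b a hperm]
      simp only [List.length_nil, decide_eq_true hs]
      exact (scan_eq_true_iff b).mpr hpair
    · -- B returns false; show A does too
      rw [decide_eq_false hs]
      rcases hr : pvRemoveLoop a b with _ | k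
      · rfl
      · have hk : a.Perm (b ++ k) := pvRemoveLoop_perm b a k hr
        by_cases hk0 : k.length = 0
        · have hknil : k = [] := List.length_eq_zero_iff.mp hk0
          subst hknil
          simp only [List.length_nil, not_true_eq_false, if_false]
          simp only [List.append_nil] at hk
          by_cases hscan :
            ((PySem.List.pyRange 0 ((b.length : Int) - 1) 1).foldl
              (fun ok i =>
                if PySem.List.pyGetD b i 0 > PySem.List.pyGetD b (i + 1) 0 then false
                else ok) true) = true
          · exact absurd (PySem.List.sorted_id_eq_of_perm_of_pairwise a b hk.symm
              ((scan_eq_true_iff b).mp hscan)) hs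
          · simpa using hscan
        · simp [hk0]
  · simp [hl]
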